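-- pv_equiv track=rewrite | github.com/SharpJype/generate | lib/datapck.py | strmatch
-- ===== SOURCE A (Python) =====
-- def strmatch(string, options): # find best exact match
--     str_l = len(string)
--     for i in range(1, str_l+1):
--         xx = string[:i]
--         options2 = []
--         for x in options:
--             if (ii:=x.find(xx))>=0: options2.append((ii, x))
--         if options2:
--             options2.sort(key=lambda x:x[1].replace(xx, "."*len(xx)).lower())#x[0] if x[0]>0 else str_l)
--             options = [x[1] for x in options2]
--     return options[0]
-- ===== SOURCE B (Python) =====
-- def strmatch(string, options):
--     # B: find the longest prefix of `string` contained in some option, filter to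
--     # those options, and sort ONCE by the composite key (longest prefix first)
--     # instead of re-sorting at every prefix length.
--     L = len(string)
--     k = 0
--     for i in range(1, L + 1):
--         if any(string[:i] in x for x in options):
--             k = i
--         else:
--             break
--     if k == 0:
--         return options[0]
--     survivors = [x for x in options if string[:k] in x]
--     def key(x):
--         return tuple(x.replace(string[:i], "." * i).lower() for i in range(k, 0, -1))
--     return sorted(survivors, key=key)[0]
-- ===== Notes on version B (the rewrite author's own statement) =====
-- stated objective: faster
-- what changed: A re-filters and re-sorts the whole option list once per prefix length (L stable sorts); B computes the longest contained prefix length once, filters the survivors once, and does a single sort with a composite tuple key that is equivalent to A's sequence of stable sorts.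
import Mathlib
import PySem

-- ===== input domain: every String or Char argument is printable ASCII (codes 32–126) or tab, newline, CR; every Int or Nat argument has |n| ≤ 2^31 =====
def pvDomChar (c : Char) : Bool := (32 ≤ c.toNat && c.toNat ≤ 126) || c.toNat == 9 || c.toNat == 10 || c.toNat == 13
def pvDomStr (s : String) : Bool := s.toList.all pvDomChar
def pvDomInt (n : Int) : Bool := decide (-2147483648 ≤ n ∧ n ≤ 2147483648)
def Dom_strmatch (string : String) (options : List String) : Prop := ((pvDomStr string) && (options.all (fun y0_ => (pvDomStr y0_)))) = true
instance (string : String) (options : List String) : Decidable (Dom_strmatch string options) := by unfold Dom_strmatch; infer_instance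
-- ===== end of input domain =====

-- B replaces A's per-prefix-length re-filter + re-sort of the option list by one scan for the
-- longest contained prefix, one filter, and ONE sort with a composite (tuple) key; objective: faster.

-- "."*n  (shared string-repeat helper)
def pvDots (n : Int) : String := String.ofList (List.replicate n.toNat '.')

-- ===== PORT A =====
def strmatch (string : String) (options : List String) : String :=
  let str_l : Int := PySem.Str.len string
  let opts := (PySem.List.pyRange 1 (str_l + 1)).foldl (fun options i =>
    let xx := PySem.Str.slice string none (some i)
    let options2 := options.foldl (fun acc x =>
      let ii := PySem.Str.find x xx
      if 0 ≤ ii then acc ++ [(ii, x)] else acc) ([] : List (Int × String))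
    if options2.isEmpty then options
    else
      (PySem.List.sorted options2
        (fun p => PySem.Str.lower (PySem.Str.replace p.2 xx (pvDots (PySem.Str.len xx)))) false).map
        (fun p => p.2)) options
  (PySem.List.pyGet? opts 0).getD ""

-- ===== PORT B =====
-- the `for i in range(1, L+1): if any(...): k = i else: break` loop of Source B
def pvScan (string : String) (options : List String) (stop : Nat) (i : Nat) (k : Int) : Int :=
  if i ≤ stop then
    (if options.any (fun x => PySem.Str.isIn (PySem.Str.slice string none (some (i : Int))) x) then
      pvScan string options stop (i + 1) (i : Int)
    else k)
  else k
termination_by stop + 1 - i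

def strmatch_alt (string : String) (options : List String) : String :=
  let k := pvScan string options string.toList.length 1 0
  if k = 0 then (PySem.List.pyGet? options 0).getD ""
  else
    let p := PySem.Str.slice string none (some k)
    let survivors := options.filter (fun x => PySem.Str.isIn p x)
    (PySem.List.pyGet?
      (PySem.List.sorted survivors
        (fun x => (PySem.List.pyRange k 0 (-1)).map (fun i =>
          PySem.Str.lower (PySem.Str.replace x (PySem.Str.slice string none (some i)) (pvDots i)))) false)
      0).getD ""

-- ===== PRECONDITION & SPEC =====
-- Pre_ excludes exactly the empty option list, on which the Python A (and B) raises IndexError.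
def Pre_strmatch (string : String) (options : List String) : Prop := options ≠ []
instance (string : String) (options : List String) : Decidable (Pre_strmatch string options) := by
  unfold Pre_strmatch; infer_instance

def pvWitness_strmatch : String × List String := ("ca", ["dog", "cat", "Car"])

def Spec_strmatch (string : String) (options : List String) (out : String) : Prop := out = strmatch_alt string options
instance (string : String) (options : List String) (out : String) : Decidable (Spec_strmatch string options out) := by
  unfold Spec_strmatch; infer_instance

-- ===== CLAIM (what is proved, stated in full; the proofs are below) =====
def Claim_equal_strmatch : Prop := ∀ (string : String) (options : List String), Dom_strmatch string options → Pre_strmatch string options → Spec_strmatch string options (strmatch string options)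

-- ===== LEMMAS AND PROOFS =====

-- ---- proof-side vocabulary ----

-- string[:j]
def pvPfx (string : String) (j : Int) : String := PySem.Str.slice string none (some j)

theorem pvPfx_def (string : String) (j : Int) :
    PySem.Str.slice string none (some j) = pvPfx string j := rfl

-- the sort key A uses in the round for prefix length i (with len(string[:i]) = i substituted)
def pvKfn (string : String) (i : Int) (x : String) : String :=
  PySem.Str.lower (PySem.Str.replace x (pvPfx string i) (pvDots i))

-- composite key: [key_j, key_{j-1}, …, key_1]
def pvKK (string : String) : Nat → String → List String
  | 0, _ => []
  | j + 1, x => pvKfn string ((j : Int) + 1) x :: pvKK string j x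

-- "key a < key b, or equal keys and R a b"  (the order a stable sort by `key` refines R into)
def pvS {α κ : Type} [LT κ] (key : α → κ) (R : α → α → Prop) (a b : α) : Prop :=
  key a < key b ∨ (key a = key b ∧ R a b)

-- the strict composite order after j rounds, on index-tagged options
def pvOrd (string : String) (j : Nat) : (Int × String) → (Int × String) → Prop :=
  pvS (fun p => pvKK string j p.2) (fun p q => p.1 < q.1)

-- index-tagged options that contain string[:j]
def pvAnchor (string : String) (options : List String) (j : Nat) : List (Int × String) :=
  (PySem.List.enumerate options 0).filter (fun p => PySem.Str.isIn (pvPfx string (j : Int)) p.2)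

def pvAnyP (string : String) (options : List String) (j : Nat) : Bool :=
  options.any (fun x => PySem.Str.isIn (pvPfx string (j : Int)) x)

-- the longest prefix length any option contains
def pvKstar (string : String) (options : List String) : Nat :=
  Nat.findGreatest (fun j => pvAnyP string options j = true) string.toList.length

-- A's loop body (the lambda of the port, lets expanded)
def pvRound (string : String) (options : List String) (i : Int) : List String :=
  if (options.foldl (fun acc x =>
        if 0 ≤ PySem.Str.find x (PySem.Str.slice string none (some i)) then
          acc ++ [(PySem.Str.find x (PySem.Str.slice string none (some i)), x)]
        else acc) ([] : List (Int × String))).isEmpty then options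
  else
    (PySem.List.sorted
      (options.foldl (fun acc x =>
        if 0 ≤ PySem.Str.find x (PySem.Str.slice string none (some i)) then
          acc ++ [(PySem.Str.find x (PySem.Str.slice string none (some i)), x)]
        else acc) ([] : List (Int × String)))
      (fun p => PySem.Str.lower (PySem.Str.replace p.2 (PySem.Str.slice string none (some i))
        (pvDots (PySem.Str.len (PySem.Str.slice string none (some i)))))) false).map (fun p => p.2)

-- A's option-list state after j rounds
def pvState (string : String) (options : List String) : Nat → List String
  | 0 => options
  | j + 1 => pvRound string (pvState string options j) ((j : Int) + 1)

-- ---- basic string facts ----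

theorem pvPfx_toList (string : String) (j : Nat) :
    (pvPfx string (j : Int)).toList = string.toList.take j := by
  simp [pvPfx, pysem]

theorem pvLen_pfx (string : String) (j : Nat) (hj : j ≤ string.toList.length) :
    PySem.Str.len (pvPfx string (j : Int)) = (j : Int) := by
  simp only [PySem.Str.len_eq, pvPfx_toList, List.length_take]
  congr 1
  omega

theorem pvFind_isIn (x xx : String) : (decide (0 ≤ PySem.Str.find x xx)) = PySem.Str.isIn xx x := by
  by_cases h : xx.toList <:+: x.toList
  · rw [(PySem.Str.isIn_iff_infix xx x).mpr h]
    exact decide_eq_true ((PySem.Str.find_nonneg_iff x xx).mpr h)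
  · have h1 : ¬ (0 ≤ PySem.Str.find x xx) := fun hc => h ((PySem.Str.find_nonneg_iff x xx).mp hc)
    cases hb : PySem.Str.isIn xx x with
    | false => exact decide_eq_false h1
    | true => exact absurd ((PySem.Str.isIn_iff_infix xx x).mp hb) h

theorem pvIsIn_mono (string x : String) (j₁ j₂ : Nat) (h : j₁ ≤ j₂)
    (hx : PySem.Str.isIn (pvPfx string (j₂ : Int)) x = true) :
    PySem.Str.isIn (pvPfx string (j₁ : Int)) x = true := by
  rw [PySem.Str.isIn_iff_infix] at hx ⊢
  rw [pvPfx_toList] at hx ⊢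
  have h1 : string.toList.take j₁ = (string.toList.take j₂).take j₁ := by
    rw [List.take_take, min_eq_left h]
  rw [h1]
  exact ((List.take_prefix _ _).isInfix.trans hx)

theorem pvIsIn_zero (string x : String) : PySem.Str.isIn (pvPfx string ((0 : Nat) : Int)) x = true := by
  have h : (pvPfx string ((0 : Nat) : Int)).toList = [] := by rw [pvPfx_toList]; rfl
  rw [PySem.Str.isIn_iff_infix, h]
  exact ⟨[], x.toList, rfl⟩

theorem pvAnyP_mono (string : String) (options : List String) (j₁ j₂ : Nat) (h : j₁ ≤ j₂)
    (hx : pvAnyP string options j₂ = true) : pvAnyP string options j₁ = true := by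
  simp only [pvAnyP, List.any_eq_true] at hx ⊢
  obtain ⟨x, hx1, hx2⟩ := hx
  exact ⟨x, hx1, pvIsIn_mono string x j₁ j₂ h hx2⟩

-- ---- A's inner loop is a filter + map ----

theorem pvFold_filter (xx : String) (l : List String) :
    l.foldl (fun acc x =>
      if 0 ≤ PySem.Str.find x xx then acc ++ [(PySem.Str.find x xx, x)] else acc)
      ([] : List (Int × String)) =
    (l.filter (fun x => PySem.Str.isIn xx x)).map (fun x => (PySem.Str.find x xx, x)) := by
  have hfun : (fun (acc : List (Int × String)) x =>
      if 0 ≤ PySem.Str.find x xx then acc ++ [(PySem.Str.find x xx, x)] else acc) =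
      (fun acc x => if PySem.Str.isIn xx x = true then acc ++ [(PySem.Str.find x xx, x)] else acc) := by
    funext acc x
    by_cases hx : PySem.Str.isIn xx x = true
    · have hle : (0 : Int) ≤ PySem.Str.find x xx := of_decide_eq_true (by rw [pvFind_isIn, hx])
      rw [if_pos hle, if_pos hx]
    · have hxf : PySem.Str.isIn xx x = false := by
        cases hb : PySem.Str.isIn xx x with
        | false => rfl
        | true => exact absurd hb hx
      have hlt : ¬ (0 : Int) ≤ PySem.Str.find x xx :=
        of_decide_eq_false ((pvFind_isIn x xx).trans hxf)
      rw [if_neg hlt, if_neg hx]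
  rw [hfun]
  have h := PySem.List.foldl_append_if (fun x => PySem.Str.isIn xx x)
    (fun x => (PySem.Str.find x xx, x)) l ([] : List (Int × String))
  rw [List.nil_append] at h
  exact h

-- ---- map commutes with a stable sort whose key factors through the map ----

theorem pvInsertBy_cons {α : Type} (bef : α → α → Bool) (x y : α) (ys : List α) :
    PySem.List.insertBy bef x (y :: ys) =
      if bef x y then x :: y :: ys else y :: PySem.List.insertBy bef x ys := rfl

theorem pvInsertBy_nil {α : Type} (bef : α → α → Bool) (x : α) :
    PySem.List.insertBy bef x [] = [x] := rfl

theorem pvMap_insertBy {α β κ : Type} [LT κ] [DecidableLT κ] (f : α → β) (key : β → κ)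
    (x : α) (l : List α) :
    (PySem.List.insertBy (fun a b => decide (key (f a) < key (f b))) x l).map f =
      PySem.List.insertBy (fun a b => decide (key a < key b)) (f x) (l.map f) := by
  induction l with
  | nil => rfl
  | cons y ys ih =>
    rw [pvInsertBy_cons, List.map_cons, pvInsertBy_cons]
    by_cases h : decide (key (f x) < key (f y)) = true
    · rw [if_pos h, if_pos h]
      rfl
    · rw [if_neg h, if_neg h, List.map_cons, ih]

theorem pvMap_sorted {α β κ : Type} [LT κ] [DecidableLT κ] (f : α → β) (key : β → κ) (l : List α) :
    (PySem.List.sorted l (fun a => key (f a)) false).map f = PySem.List.sorted (l.map f) key false := by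
  rw [PySem.List.sorted_eq_foldl_insertBy, PySem.List.sorted_eq_foldl_insertBy]
  suffices h : ∀ acc : List α,
      (l.foldl (fun acc x => PySem.List.insertBy (fun a b => decide (key (f a) < key (f b))) x acc) acc).map f =
      (l.map f).foldl (fun acc x => PySem.List.insertBy (fun a b => decide (key a < key b)) x acc) (acc.map f) by
    simpa using h []
  induction l with
  | nil => intro acc; simp
  | cons x xs ih =>
    intro acc
    simp only [List.foldl_cons, List.map_cons]
    rw [ih, pvMap_insertBy]

-- the shape A's rounds take: sort index-tagged pairs rebuilt from the plain strings
theorem pvSorted_pairs (xx : String) (key : String → String) (l : List (Int × String)) :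
    (PySem.List.sorted ((l.map (fun p : Int × String => p.2)).map
        (fun x => (PySem.Str.find x xx, x)))
      (fun q : Int × String => key q.2) false).map (fun q : Int × String => q.2) =
    (PySem.List.sorted l (fun p : Int × String => key p.2) false).map (fun p : Int × String => p.2) := by
  have h1 : (PySem.List.sorted (l.map (fun p : Int × String => p.2)) key false).map
      (fun x => (PySem.Str.find x xx, x)) =
      PySem.List.sorted ((l.map (fun p : Int × String => p.2)).map
        (fun x => (PySem.Str.find x xx, x))) (fun q : Int × String => key q.2) false :=
    pvMap_sorted (fun x => (PySem.Str.find x xx, x)) (fun q : Int × String => key q.2)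
      (l.map (fun p : Int × String => p.2))
  have h2 : (PySem.List.sorted l (fun p : Int × String => key p.2) false).map
      (fun p : Int × String => p.2) =
      PySem.List.sorted (l.map (fun p : Int × String => p.2)) key false :=
    pvMap_sorted (fun p : Int × String => p.2) key l
  rw [← h1, h2, List.map_map]
  have hid : ((fun q : Int × String => q.2) ∘ (fun x : String => (PySem.Str.find x xx, x))) =
      (fun x : String => x) := rfl
  rw [hid, List.map_id']

-- ---- stability: sorting by `key` refines any prior Pairwise order R into pvS key R ----

theorem pvIns_stab {α κ : Type} [LT κ] [DecidableLT κ] (key : α → κ)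
    (htr : ∀ {a b c : κ}, a < b → b < c → a < c)
    (hco : ∀ {a b : κ}, ¬ a < b → ¬ b < a → a = b)
    (R : α → α → Prop) (x : α) (acc : List α)
    (h1 : acc.Pairwise (pvS key R))
    (h2 : ∀ y ∈ acc, ¬ key x < key y → ¬ key y < key x → R y x) :
    (PySem.List.insertBy (fun a b => decide (key a < key b)) x acc).Pairwise (pvS key R) := by
  induction acc with
  | nil => simp [pvInsertBy_nil]
  | cons y ys ih =>
    rw [pvInsertBy_cons]
    by_cases h : key x < key y
    · rw [if_pos (decide_eq_true h)]
      refine List.pairwise_cons.mpr ⟨?_, h1⟩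
      intro z hz
      rcases List.mem_cons.mp hz with rfl | hz
      · exact Or.inl h
      · rcases (List.pairwise_cons.mp h1).1 z hz with hlt | ⟨heq, _⟩
        · exact Or.inl (htr h hlt)
        · exact Or.inl (heq ▸ h)
    · rw [if_neg (by simpa using h)]
      refine List.pairwise_cons.mpr ⟨?_, ih (List.pairwise_cons.mp h1).2 ?_⟩
      · intro z hz
        rcases (PySem.List.mem_insertBy _ x z ys).mp hz with rfl | hz
        · by_cases hyx : key y < key z
          · exact Or.inl hyx
          · exact Or.inr ⟨hco hyx h, h2 y (List.mem_cons_self ..) h hyx⟩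
        · exact (List.pairwise_cons.mp h1).1 z hz
      · intro z hz hxz hzx
        exact h2 z (List.mem_cons_of_mem _ hz) hxz hzx

theorem pvFoldl_stab {α κ : Type} [LT κ] [DecidableLT κ] (key : α → κ)
    (htr : ∀ {a b c : κ}, a < b → b < c → a < c)
    (hco : ∀ {a b : κ}, ¬ a < b → ¬ b < a → a = b)
    (R : α → α → Prop) :
    ∀ (l : List α) (acc : List α), acc.Pairwise (pvS key R) →
      (∀ y ∈ acc, ∀ x ∈ l, R y x) → l.Pairwise R →
      (l.foldl (fun acc x => PySem.List.insertBy (fun a b => decide (key a < key b)) x acc) acc).Pairwise (pvS key R) := by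
  intro l
  induction l with
  | nil => intro acc h1 _ _; simpa using h1
  | cons x xs ih =>
    intro acc h1 h2 hR
    simp only [List.foldl_cons]
    refine ih _ (pvIns_stab key htr hco R x acc h1 ?_) ?_ (List.pairwise_cons.mp hR).2
    · intro y hy _ _; exact h2 y hy x (List.mem_cons_self ..)
    · intro y hy x' hx'
      rcases (PySem.List.mem_insertBy _ x y acc).mp hy with rfl | hy
      · exact (List.pairwise_cons.mp hR).1 x' hx'
      · exact h2 y hy x' (List.mem_cons_of_mem _ hx')

theorem pvSorted_stab {α κ : Type} [LT κ] [DecidableLT κ] (key : α → κ)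
    (htr : ∀ {a b c : κ}, a < b → b < c → a < c)
    (hco : ∀ {a b : κ}, ¬ a < b → ¬ b < a → a = b)
    (R : α → α → Prop) (l : List α) (hR : l.Pairwise R) :
    (PySem.List.sorted l key false).Pairwise (pvS key R) := by
  rw [PySem.List.sorted_eq_foldl_insertBy]
  exact pvFoldl_stab key htr hco R l [] (by simp) (by simp) hR

theorem pvStr_trans {a b c : String} (h1 : a < b) (h2 : b < c) : a < c := lt_trans h1 h2
theorem pvStr_conn {a b : String} (h1 : ¬ a < b) (h2 : ¬ b < a) : a = b :=
  le_antisymm (le_of_not_gt h2) (le_of_not_gt h1)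
theorem pvLStr_trans {a b c : List String} (h1 : a < b) (h2 : b < c) : a < c := lt_trans h1 h2
theorem pvLStr_conn {a b : List String} (h1 : ¬ a < b) (h2 : ¬ b < a) : a = b :=
  le_antisymm (le_of_not_gt h2) (le_of_not_gt h1)

-- ---- composite-order bookkeeping ----

theorem pvOrd_succ (string : String) (j : Nat) (p q : Int × String) :
    pvS (fun p : Int × String => pvKfn string ((j : Int) + 1) p.2) (pvOrd string j) p q ↔
      pvOrd string (j + 1) p q := by
  simp only [pvS, pvOrd, pvKK, List.cons_lt_cons_iff, List.cons.injEq]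
  tauto

theorem pvOrd_anti (string : String) (j : Nat) (a b : Int × String)
    (hab : pvOrd string j a b) (hba : pvOrd string j b a) : a = b := by
  rcases hab with h1 | ⟨e1, h1⟩ <;> rcases hba with h2 | ⟨e2, h2⟩
  · exact absurd h2 (lt_asymm h1)
  · exact absurd h1 (by rw [e2]; exact lt_irrefl _)
  · exact absurd h2 (by rw [e1]; exact lt_irrefl _)
  · exact absurd h2 (by omega)

-- ---- B's composite key is pvKK ----

theorem pvRange_neg (n : Nat) :
    PySem.List.pyRange (n : Int) 0 (-1) = (List.range n).map (fun j : Nat => (n : Int) - (j : Int)) := by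
  cases n with
  | zero => simp [PySem.List.pyRange]
  | succ n =>
    simp only [PySem.List.pyRange]
    norm_num
    intro a _
    ring

theorem pvBkey_KK (string x : String) : ∀ k : Nat,
    (PySem.List.pyRange (k : Int) 0 (-1)).map (fun i =>
      PySem.Str.lower (PySem.Str.replace x (PySem.Str.slice string none (some i)) (pvDots i))) =
    pvKK string k x := by
  intro k
  induction k with
  | zero => simp [pvRange_neg, pvKK]
  | succ k ih =>
    rw [pvRange_neg, List.range_succ_eq_map,
      show pvKK string (k + 1) x = pvKfn string ((k : Int) + 1) x :: pvKK string k x from rfl]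
    simp only [List.map_cons, List.map_map, Function.comp, Nat.succ_eq_add_one,
      Nat.cast_add, Nat.cast_one, Nat.cast_zero, sub_zero]
    congr 1
    rw [← ih, pvRange_neg]
    simp only [List.map_map]
    apply List.map_congr_left
    intro a _
    simp only [Function.comp_apply, Nat.succ_eq_add_one]
    congr 1
    push_cast
    ring

-- ---- the pyRange 1 (L+1) fold is pvState ----

theorem pvPyRange_self (a : Int) : PySem.List.pyRange a a = [] := by
  simp [PySem.List.pyRange, lt_irrefl]

theorem pvFoldA_eq (string : String) (options : List String) : ∀ j : Nat,
    (PySem.List.pyRange 1 ((j : Int) + 1)).foldl (pvRound string) options = pvState string options j := by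
  intro j
  induction j with
  | zero => simp [pvPyRange_self, pvState]
  | succ j ih =>
    have hc : (((j + 1 : Nat)) : Int) = (j : Int) + 1 := by push_cast; ring
    have hsplit : PySem.List.pyRange 1 (((j : Int) + 1) + 1) =
        PySem.List.pyRange 1 ((j : Int) + 1) ++ [(j : Int) + 1] := by
      rw [PySem.List.pyRange_one_append 1 ((j : Int) + 1) (((j : Int) + 1) + 1) (by omega) (by omega)]
      congr 1
      rw [PySem.List.pyRange_one_cons (by omega), pvPyRange_self]
    rw [hc, hsplit, List.foldl_append, ih]
    rfl

theorem pvStrmatch_eq (string : String) (options : List String) :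
    strmatch string options =
      (PySem.List.pyGet? (pvState string options string.toList.length) 0).getD "" := by
  have h : strmatch string options =
      (PySem.List.pyGet? ((PySem.List.pyRange 1 (PySem.Str.len string + 1)).foldl (pvRound string) options) 0).getD "" := rfl
  rw [h, PySem.Str.len_eq, pvFoldA_eq]

-- ---- anchors ----

theorem pvMem_anchor (string : String) (options : List String) (j : Nat) (p : Int × String)
    (hp : p ∈ pvAnchor string options j) : p.2 ∈ options := by
  have hmem := List.mem_of_mem_filter hp
  rw [PySem.List.mem_enumerate_iff] at hmem
  obtain ⟨k, hk, rfl⟩ := hmem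
  exact List.getElem_mem hk

theorem pvPair_anchor (string : String) (options : List String) (j : Nat) (x : String)
    (hx : x ∈ options) (hin : PySem.Str.isIn (pvPfx string (j : Int)) x = true) :
    ∃ p ∈ pvAnchor string options j, p.2 = x := by
  obtain ⟨k, hk, rfl⟩ := List.mem_iff_getElem.mp hx
  refine ⟨((0 : Int) + (k : Int), options[k]), ?_, rfl⟩
  simp only [pvAnchor, List.mem_filter]
  constructor
  · rw [PySem.List.mem_enumerate_iff]
    exact ⟨k, hk, rfl⟩
  · exact hin

theorem pvAnchor_filter (string : String) (options : List String) (j : Nat) :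
    (pvAnchor string options j).filter (fun p => PySem.Str.isIn (pvPfx string ((j : Int) + 1)) p.2) =
      pvAnchor string options (j + 1) := by
  simp only [pvAnchor, List.filter_filter]
  apply List.filter_congr
  intro p _
  have hc : (((j + 1 : Nat)) : Int) = (j : Int) + 1 := by push_cast; ring
  rw [hc]
  cases hx : PySem.Str.isIn (pvPfx string ((j : Int) + 1)) p.2 with
  | false => rw [Bool.false_and]
  | true =>
    have hj : PySem.Str.isIn (pvPfx string (j : Int)) p.2 = true := by
      have := pvIsIn_mono string p.2 j (j + 1) (by omega) (by rw [hc]; exact hx)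
      exact this
    rw [hj, Bool.true_and]

theorem pvSurvivors_eq (string : String) (options : List String) (j : Nat) :
    options.filter (fun x => PySem.Str.isIn (pvPfx string (j : Int)) x) =
      (pvAnchor string options j).map (fun p => p.2) := by
  conv_lhs => rw [← PySem.List.map_snd_enumerate options 0]
  rw [List.filter_map]
  rfl

-- ---- pvKstar facts ----

theorem pvKstar_le (string : String) (options : List String) :
    pvKstar string options ≤ string.toList.length := Nat.findGreatest_le _

theorem pvKstar_spec (string : String) (options : List String)
    (h : 0 < pvKstar string options) : pvAnyP string options (pvKstar string options) = true := by
  obtain ⟨-, h2, -⟩ := (Nat.findGreatest_eq_iff).mp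
    (rfl : Nat.findGreatest (fun j => pvAnyP string options j = true) string.toList.length =
      pvKstar string options)
  exact h2 (Nat.pos_iff_ne_zero.mp h)

theorem pvKstar_greatest (string : String) (options : List String) (j : Nat)
    (h1 : pvKstar string options < j) (h2 : j ≤ string.toList.length) :
    pvAnyP string options j = false := by
  obtain ⟨-, -, h3⟩ := (Nat.findGreatest_eq_iff).mp
    (rfl : Nat.findGreatest (fun j => pvAnyP string options j = true) string.toList.length =
      pvKstar string options)
  have := h3 h1 h2
  cases hb : pvAnyP string options j with
  | false => rfl
  | true => exact absurd hb this

-- ---- the round step ----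

theorem pvStep (string : String) (options : List String) (j : Nat)
    (hj : j + 1 ≤ pvKstar string options)
    (Z : List (Int × String))
    (hperm : Z.Perm (pvAnchor string options j))
    (hpair : Z.Pairwise (pvOrd string j))
    (hstate : pvState string options j = Z.map (fun p => p.2)) :
    ∃ Z' : List (Int × String),
      Z'.Perm (pvAnchor string options (j + 1)) ∧
      Z'.Pairwise (pvOrd string (j + 1)) ∧
      pvState string options (j + 1) = Z'.map (fun p => p.2) := by
  have hc : (((j + 1 : Nat)) : Int) = (j : Int) + 1 := by push_cast; ring
  have hjL : j + 1 ≤ string.toList.length := le_trans hj (pvKstar_le string options)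
  have hany : pvAnyP string options (j + 1) = true := by
    have hm : 0 < pvKstar string options := by omega
    exact pvAnyP_mono string options (j + 1) (pvKstar string options) hj (pvKstar_spec string options hm)
  obtain ⟨x, hxopt, hxin⟩ := List.any_eq_true.mp (by simpa only [pvAnyP] using hany)
  set W : List (Int × String) :=
    Z.filter (fun p => PySem.Str.isIn (pvPfx string ((j : Int) + 1)) p.2) with hW
  refine ⟨PySem.List.sorted W (fun p : Int × String => pvKfn string ((j : Int) + 1) p.2) false, ?_, ?_, ?_⟩
  · refine (PySem.List.sorted_perm _ _ _).trans ?_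
    have h1 := hperm.filter (fun p : Int × String => PySem.Str.isIn (pvPfx string ((j : Int) + 1)) p.2)
    rw [pvAnchor_filter string options j] at h1
    exact h1
  · have hp := pvSorted_stab (fun p : Int × String => pvKfn string ((j : Int) + 1) p.2)
      pvStr_trans pvStr_conn (pvOrd string j) W (hpair.filter _)
    exact hp.imp (fun h => (pvOrd_succ string j _ _).mp h)
  · -- W is nonempty: x's pair lies in it
    have hxinj : PySem.Str.isIn (pvPfx string (j : Int)) x = true :=
      pvIsIn_mono string x j (j + 1) (by omega) hxin
    obtain ⟨p, hpA, hpx⟩ := pvPair_anchor string options j x hxopt hxinj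
    have hpZ : p ∈ Z := hperm.mem_iff.mpr hpA
    have hpW : p ∈ W := by
      rw [hW, List.mem_filter]
      refine ⟨hpZ, ?_⟩
      rw [hpx, ← hc]
      exact hxin
    show pvRound string (pvState string options j) ((j : Int) + 1) = _
    rw [hstate]
    simp only [pvRound]
    rw [pvFold_filter, pvPfx_def, List.filter_map]
    have hcomp : ((fun x => PySem.Str.isIn (pvPfx string ((j : Int) + 1)) x) ∘ (fun p : Int × String => p.2)) =
        (fun p : Int × String => PySem.Str.isIn (pvPfx string ((j : Int) + 1)) p.2) := rfl
    rw [hcomp, ← hW]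
    have hne : ((W.map (fun p : Int × String => p.2)).map
        (fun x => (PySem.Str.find x (pvPfx string ((j : Int) + 1)), x))).isEmpty = false := by
      rcases W with _ | ⟨w, ws⟩
      · exact absurd rfl (List.ne_nil_of_mem hpW)
      · rfl
    rw [hne]
    simp only [Bool.false_eq_true, if_false]
    have hlen : PySem.Str.len (pvPfx string ((j : Int) + 1)) = (j : Int) + 1 := by
      rw [← hc]
      exact pvLen_pfx string (j + 1) hjL
    rw [hlen]
    exact pvSorted_pairs (pvPfx string ((j : Int) + 1))
      (fun x => PySem.Str.lower (PySem.Str.replace x (pvPfx string ((j : Int) + 1)) (pvDots ((j : Int) + 1)))) W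

theorem pvInv (string : String) (options : List String) : ∀ j, j ≤ pvKstar string options →
    ∃ Z : List (Int × String),
      Z.Perm (pvAnchor string options j) ∧
      Z.Pairwise (pvOrd string j) ∧
      pvState string options j = Z.map (fun p => p.2) := by
  intro j
  induction j with
  | zero =>
    intro _
    refine ⟨PySem.List.enumerate options 0, ?_, ?_, (PySem.List.map_snd_enumerate options 0).symm⟩
    · simp only [pvAnchor]
      rw [List.filter_congr (fun p _ => by rw [pvIsIn_zero]), List.filter_true]
    · refine (PySem.List.pairwise_lt_enumerate options 0).imp ?_
      intro a b h
      exact Or.inr ⟨rfl, h⟩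
  | succ j ih =>
    intro hj
    rcases ih (by omega) with ⟨Z, h1, h2, h3⟩
    exact pvStep string options j hj Z h1 h2 h3

theorem pvNoop (string : String) (options : List String) :
    ∀ j, pvKstar string options ≤ j → j ≤ string.toList.length →
      pvState string options j = pvState string options (pvKstar string options) := by
  intro j hmj
  induction j, hmj using Nat.le_induction with
  | base => intro _; rfl
  | succ j hmj ih =>
    intro hjL
    have hstate := ih (by omega)
    obtain ⟨Z, hperm, _, hZ⟩ := pvInv string options (pvKstar string options) le_rfl
    have hfilter : (pvState string options j).filter
        (fun x => PySem.Str.isIn (pvPfx string ((j : Int) + 1)) x) = [] := by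
      rw [List.filter_eq_nil_iff]
      intro x hx hin
      have hxopt : x ∈ options := by
        rw [hstate, hZ] at hx
        obtain ⟨p, hpZ, rfl⟩ := List.mem_map.mp hx
        exact pvMem_anchor string options _ p (hperm.mem_iff.mp hpZ)
      have hT : pvAnyP string options (j + 1) = true := by
        simp only [pvAnyP, List.any_eq_true]
        refine ⟨x, hxopt, ?_⟩
        rw [show (((j + 1 : Nat)) : Int) = (j : Int) + 1 by push_cast; ring]
        exact hin
      rw [pvKstar_greatest string options (j + 1) (by omega) hjL] at hT
      exact Bool.false_ne_true hT
    show pvRound string (pvState string options j) ((j : Int) + 1) = _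
    simp only [pvRound]
    rw [pvFold_filter, pvPfx_def, hfilter]
    simpa using hstate

-- ---- the scan of B computes pvKstar ----

theorem pvScan_run (string : String) (options : List String) :
    ∀ n i, pvKstar string options + 1 - i = n → 1 ≤ i → i ≤ pvKstar string options + 1 →
      pvScan string options string.toList.length i ((i : Int) - 1) = (pvKstar string options : Int) := by
  intro n
  induction n with
  | zero =>
    intro i hn _ h2
    have hi : i = pvKstar string options + 1 := by omega
    rw [pvScan.eq_def]
    by_cases hL : i ≤ string.toList.length
    · rw [if_pos hL]
      have hfalse : options.any (fun x => PySem.Str.isIn (PySem.Str.slice string none (some (i : Int))) x) = false := by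
        have h := pvKstar_greatest string options i (by omega) hL
        simpa only [pvAnyP, pvPfx] using h
      rw [hfalse]
      simp only [Bool.false_eq_true, if_false]
      rw [hi]
      push_cast
      ring
    · rw [if_neg hL, hi]
      push_cast
      ring
  | succ n ihn =>
    intro i hn h1 h2
    have hi : i ≤ pvKstar string options := by omega
    have hiL : i ≤ string.toList.length := le_trans hi (pvKstar_le string options)
    have htrue : options.any (fun x => PySem.Str.isIn (PySem.Str.slice string none (some (i : Int))) x) = true := by
      have hm : 0 < pvKstar string options := by omega
      have h := pvAnyP_mono string options i (pvKstar string options) hi (pvKstar_spec string options hm)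
      simpa only [pvAnyP, pvPfx] using h
    rw [pvScan.eq_def, if_pos hiL, htrue]
    simp only [if_true]
    rw [show (i : Int) = ((i + 1 : Nat) : Int) - 1 by push_cast; ring]
    exact ihn (i + 1) (by omega) (by omega) (by omega)

theorem pvScan_eq (string : String) (options : List String) :
    pvScan string options string.toList.length 1 0 = (pvKstar string options : Int) := by
  have h := pvScan_run string options (pvKstar string options) 1 (by omega) le_rfl (by omega)
  simpa using h

-- ===== VERDICT (by name: the statement is the Claim_ definition above) =====
theorem strmatch_spec : Claim_equal_strmatch := by
  intro string options _hdom _hpre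
  unfold Spec_strmatch
  have halt : strmatch_alt string options =
      (if (pvScan string options string.toList.length 1 0) = 0 then (PySem.List.pyGet? options 0).getD ""
       else (PySem.List.pyGet?
        (PySem.List.sorted (options.filter (fun x => PySem.Str.isIn
            (PySem.Str.slice string none (some (pvScan string options string.toList.length 1 0))) x))
          (fun x => (PySem.List.pyRange (pvScan string options string.toList.length 1 0) 0 (-1)).map (fun i =>
            PySem.Str.lower (PySem.Str.replace x (PySem.Str.slice string none (some i)) (pvDots i)))) false)
        0).getD "") := rfl
  rw [pvStrmatch_eq, halt, pvScan_eq]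
  by_cases hm : pvKstar string options = 0
  · rw [hm]
    rw [if_pos (show (((0 : Nat) : Int) = 0) by norm_num)]
    rw [pvNoop string options string.toList.length (by rw [hm]; exact Nat.zero_le _) le_rfl, hm]
    rfl
  · rw [if_neg (by exact_mod_cast hm)]
    rw [pvNoop string options string.toList.length (pvKstar_le string options) le_rfl]
    obtain ⟨Z, hperm, hpair, hstate⟩ := pvInv string options (pvKstar string options) le_rfl
    rw [hstate]
    have hBkey : (fun x => (PySem.List.pyRange ((pvKstar string options : Nat) : Int) 0 (-1)).map (fun i =>
        PySem.Str.lower (PySem.Str.replace x (PySem.Str.slice string none (some i)) (pvDots i)))) =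
        (fun x => pvKK string (pvKstar string options) x) := by
      funext x
      exact pvBkey_KK string x (pvKstar string options)
    rw [hBkey, pvPfx_def, pvSurvivors_eq]
    have h2' : (PySem.List.sorted (pvAnchor string options (pvKstar string options))
          (fun p : Int × String => pvKK string (pvKstar string options) p.2) false).map
          (fun p : Int × String => p.2) =
        PySem.List.sorted ((pvAnchor string options (pvKstar string options)).map
          (fun p : Int × String => p.2)) (fun x => pvKK string (pvKstar string options) x) false :=
      pvMap_sorted (fun p : Int × String => p.2) (fun x => pvKK string (pvKstar string options) x) _
    rw [← h2']
    have hpair'' : (PySem.List.sorted (pvAnchor string options (pvKstar string options))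
        (fun p : Int × String => pvKK string (pvKstar string options) p.2) false).Pairwise
        (pvOrd string (pvKstar string options)) := by
      have h := pvSorted_stab (fun p : Int × String => pvKK string (pvKstar string options) p.2)
        pvLStr_trans pvLStr_conn (fun p q : Int × String => p.1 < q.1)
        (pvAnchor string options (pvKstar string options))
        ((PySem.List.pairwise_lt_enumerate options 0).filter _)
      exact h
    have hZeq : Z = PySem.List.sorted (pvAnchor string options (pvKstar string options))
        (fun p : Int × String => pvKK string (pvKstar string options) p.2) false := by
      refine List.Perm.eq_of_pairwise ?_ hpair hpair''
        (hperm.trans (PySem.List.sorted_perm _ _ _).symm)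
      intro a b _ _ hab hba
      exact pvOrd_anti string (pvKstar string options) a b hab hba
    rw [hZeq]
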